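-- pv_equiv track=rewrite | github.com/pivote1214/optical-network | src/preprocess/preprocessor.py | _calc_candidate_channel
-- ===== SOURCE A (Python) =====
-- from typing import Dict, List, Tuple
--
-- def _calc_candidate_channel(slot_num: int, max_slot: int) -> List[List[int]]:
--     """
--     使用するスロット数と最大スロット数が与えられたときに、候補チャネルを列挙する関数
--     """
--     channels = []
--     # 候補チャネルの列挙
--     for i in range(max_slot - slot_num + 1):
--         channel = []
--         for j in range(slot_num):
--             channel.append(i + j)
--         channels.append(channel)
--
--     return channels
-- ===== SOURCE B (Python) =====
-- def _calc_candidate_channel(slot_num: int, max_slot: int):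
--     n = max_slot - slot_num + 1
--     if n <= 0:
--         return []
--     channels = []
--     cur = list(range(slot_num))
--     for _ in range(n):
--         channels.append(list(cur))
--         cur = [x + 1 for x in cur]
--     return channels
-- ===== Notes on version B (the rewrite author's own statement) =====
-- stated objective: alternative
-- what changed: Instead of recomputing each channel element as i+j in a nested loop, B maintains one running window (initialized to range(slot_num)) as loop state, appending a copy and shifting every element by 1 per iteration.
import Mathlib
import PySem

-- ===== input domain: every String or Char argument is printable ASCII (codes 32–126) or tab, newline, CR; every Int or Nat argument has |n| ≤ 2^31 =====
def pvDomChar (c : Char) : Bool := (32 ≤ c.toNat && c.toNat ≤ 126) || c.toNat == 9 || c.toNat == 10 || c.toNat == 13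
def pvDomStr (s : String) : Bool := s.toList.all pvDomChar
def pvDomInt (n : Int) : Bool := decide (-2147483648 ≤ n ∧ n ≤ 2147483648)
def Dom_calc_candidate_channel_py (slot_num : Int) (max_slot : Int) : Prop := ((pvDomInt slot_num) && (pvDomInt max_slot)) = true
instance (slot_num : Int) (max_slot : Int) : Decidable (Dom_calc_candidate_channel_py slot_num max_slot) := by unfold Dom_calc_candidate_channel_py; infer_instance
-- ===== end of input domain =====

-- B enumerates the channels by threading a single running window forward as state
-- (append a copy, then shift by 1) instead of recomputing each element i+j; same cost, different decomposition.

-- ===== PORT A =====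
def calc_candidate_channel_py (slot_num : Int) (max_slot : Int) : List (List Int) :=
  (PySem.List.pyRange 0 (max_slot - slot_num + 1) 1).foldl
    (fun channels i =>
      channels ++ [(PySem.List.pyRange 0 slot_num 1).foldl (fun channel j => channel ++ [i + j]) []])
    []

-- ===== PORT B =====
def calc_candidate_channel_py_alt (slot_num : Int) (max_slot : Int) : List (List Int) :=
  if max_slot - slot_num + 1 ≤ 0 then [] else
  ((PySem.List.pyRange 0 (max_slot - slot_num + 1) 1).foldl
    (fun (st : List (List Int) × List Int) _ =>
      (st.1 ++ [st.2], st.2.map (fun x => x + 1)))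
    ([], PySem.List.pyRange 0 slot_num 1)).1

-- ===== PRECONDITION & SPEC =====
def Spec_calc_candidate_channel_py (slot_num : Int) (max_slot : Int) (out : List (List Int)) : Prop := out = calc_candidate_channel_py_alt slot_num max_slot
instance (slot_num : Int) (max_slot : Int) (out : List (List Int)) : Decidable (Spec_calc_candidate_channel_py slot_num max_slot out) := by unfold Spec_calc_candidate_channel_py; infer_instance

-- ===== CLAIM (what is proved, stated in full; the proofs are below) =====
def Claim_equal_calc_candidate_channel_py : Prop := ∀ (slot_num : Int) (max_slot : Int), Dom_calc_candidate_channel_py slot_num max_slot → Spec_calc_candidate_channel_py slot_num max_slot (calc_candidate_channel_py slot_num max_slot)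

-- ===== LEMMAS AND PROOFS =====

-- append-accumulator fold = init ++ map
theorem pv_foldl_append_map {α β : Type} (f : α → β) (L : List α) (init : List β) :
    L.foldl (fun acc x => acc ++ [f x]) init = init ++ L.map f := by
  induction L generalizing init with
  | nil => simp
  | cons a l ih =>
      simp [List.foldl_cons, ih]

-- B's fold: the accumulator collects successive shifts of the window
theorem pv_window_fold {α : Type} (L : List α) (acc : List (List Int)) (cur : List Int) :
    (L.foldl (fun (st : List (List Int) × List Int) _ =>
        (st.1 ++ [st.2], st.2.map (fun x => x + 1))) (acc, cur)).1
      = acc ++ (List.range L.length).map (fun k : Nat => cur.map (fun x => x + (k : Int))) := by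
  induction L generalizing acc cur with
  | nil => simp
  | cons a l ih =>
      simp only [List.foldl_cons, ih, List.length_cons, List.range_succ_eq_map,
        List.map_cons, List.map_map, List.singleton_append]
      have h0 : List.map (fun x => x + ((0 : Nat) : Int)) cur = cur := by simp
      have h1 : List.map (fun k : Nat => List.map ((fun x => x + (k : Int)) ∘ fun x => x + 1) cur) (List.range l.length)
          = List.map ((fun k : Nat => List.map (fun x => x + (k : Int)) cur) ∘ Nat.succ) (List.range l.length) := by
        apply List.map_congr_left
        intro k _
        simp only [Function.comp_apply]
        apply List.map_congr_left
        intro x _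
        simp only [Function.comp_apply]
        push_cast
        ring
      rw [h0, h1]
      simp

-- ===== VERDICT (by name: the statement is the Claim_ definition above) =====
theorem calc_candidate_channel_py_spec : Claim_equal_calc_candidate_channel_py := by
  intro slot_num max_slot _
  show calc_candidate_channel_py slot_num max_slot = calc_candidate_channel_py_alt slot_num max_slot
  unfold calc_candidate_channel_py calc_candidate_channel_py_alt
  by_cases hn : max_slot - slot_num + 1 ≤ 0
  · simp [hn, PySem.List.pyRange_one, Int.toNat_of_nonpos (by omega : max_slot - slot_num + 1 - 0 ≤ 0)]
  · simp only [hn, if_false]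
    rw [pv_window_fold]
    simp only [pv_foldl_append_map, List.nil_append, PySem.List.pyRange_one,
      List.length_map, List.length_range]
    apply List.ext_getElem (by simp)
    intro n h1 h2
    simp only [List.getElem_map, List.getElem_range]
    apply List.ext_getElem (by simp)
    intro k h3 h4
    simp only [List.getElem_map, List.getElem_range]
    ring
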